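-- pv_equiv track=rewrite | github.com/rinikerlab/rest2_ampmm | analysis/roundtrips_exchange_acceptance.py | reconstruct_trajectories
-- ===== SOURCE A (Python) =====
-- from typing import Optional, Sequence
--
-- def reconstruct_trajectories(
--     all_iterations: Sequence[Sequence[tuple[int, int, bool]]],
-- ) -> list[list[int]]:
--     """Reconstruct walker trajectories in replica-index space."""
--     if not all_iterations:
--         return []
--
--     max_index_seen = max(
--         max(i, j) for iteration in all_iterations for i, j, _ in iteration
--     )
--     n_replicas = max_index_seen + 1
--
--     replica_of_walker = list(range(n_replicas))
--     walker_at_replica = list(range(n_replicas))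
--     trajectories = [[] for _ in range(n_replicas)]
--
--     for iteration in all_iterations:
--         for i, j, accepted in iteration:
--             if accepted:
--                 walker_i = walker_at_replica[i]
--                 walker_j = walker_at_replica[j]
--                 walker_at_replica[i], walker_at_replica[j] = walker_j, walker_i
--                 replica_of_walker[walker_i], replica_of_walker[walker_j] = j, i
--
--         for walker in range(n_replicas):
--             trajectories[walker].append(replica_of_walker[walker])
--
--     return trajectories
-- ===== SOURCE B (Python) =====
-- def reconstruct_trajectories(all_iterations):
--     """Reconstruct walker trajectories in replica-index space."""
--     if not all_iterations:
--         return []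
--
--     max_index_seen = max(
--         max(i, j) for iteration in all_iterations for i, j, _ in iteration
--     )
--     n_replicas = max_index_seen + 1
--
--     walker_at_replica = list(range(n_replicas))
--     snapshots = []
--     for iteration in all_iterations:
--         for i, j, accepted in iteration:
--             if accepted:
--                 walker_at_replica[i], walker_at_replica[j] = (
--                     walker_at_replica[j],
--                     walker_at_replica[i],
--                 )
--         snapshots.append(list(walker_at_replica))
--
--     inverses = []
--     for snapshot in snapshots:
--         inverse = [0] * n_replicas
--         for replica, walker in enumerate(snapshot):
--             inverse[walker] = replica
--         inverses.append(inverse)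
--
--     return [
--         [inverse[walker] for inverse in inverses]
--         for walker in range(n_replicas)
--     ]
-- ===== Notes on version B (the rewrite author's own statement) =====
-- stated objective: alternative
-- what changed: B drops A's replica_of_walker inverse array from the loop: it maintains only the walker_at_replica permutation and snapshots it once per iteration, and a separate final pass inverts each snapshot (scatter by enumerate) to produce the per-walker trajectories.
-- outside the precondition, e.g. on reconstruct_trajectories([[(-1, 0, True)]]): A returns [[-1]], B returns [[0]]
import Mathlib
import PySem

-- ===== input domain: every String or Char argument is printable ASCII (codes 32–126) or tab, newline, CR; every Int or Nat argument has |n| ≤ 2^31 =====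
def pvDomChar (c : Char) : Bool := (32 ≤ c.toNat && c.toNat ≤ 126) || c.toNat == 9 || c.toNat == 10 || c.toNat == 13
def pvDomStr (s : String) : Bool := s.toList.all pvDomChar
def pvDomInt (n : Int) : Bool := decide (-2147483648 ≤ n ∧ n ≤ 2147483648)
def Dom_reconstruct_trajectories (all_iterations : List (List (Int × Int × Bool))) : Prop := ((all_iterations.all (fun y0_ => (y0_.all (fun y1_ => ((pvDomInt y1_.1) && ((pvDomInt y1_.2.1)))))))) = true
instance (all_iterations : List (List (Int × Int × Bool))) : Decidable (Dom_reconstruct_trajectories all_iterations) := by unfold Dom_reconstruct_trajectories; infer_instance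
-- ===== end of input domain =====

-- B drops A's replica_of_walker inverse array: it only maintains the walker_at_replica
-- permutation, snapshots it per iteration, and inverts the snapshots in a final pass
-- (same return value; neither program mutates its argument).


-- ===== PORT A =====
-- max(max(i, j) for iteration in all_iterations for i, j, _ in iteration); Python's max
-- raises ValueError on an empty sequence (excluded by Pre_), where .getD 0 is never reached.
def pvMaxIndexSeen (all_iterations : List (List (Int × Int × Bool))) : Int :=
  (PySem.List.max?
    (all_iterations.flatMap (fun iteration => iteration.map (fun t => max t.1 t.2.1))) id).getD 0

-- body of A's inner loop: one swap record (i, j, accepted) acting on (replica_of_walker, walker_at_replica)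
def pvSwapA (rw : List Int × List Int) (t : Int × Int × Bool) : List Int × List Int :=
  if t.2.2 then
    let walker_i := PySem.List.pyGetD rw.2 t.1 0
    let walker_j := PySem.List.pyGetD rw.2 t.2.1 0
    (PySem.List.pySetD (PySem.List.pySetD rw.1 walker_i t.2.1) walker_j t.1,
     PySem.List.pySetD (PySem.List.pySetD rw.2 t.1 walker_j) t.2.1 walker_i)
  else rw

-- body of A's outer loop: apply all swaps of one iteration, then append replica_of_walker[walker]
-- to trajectories[walker] for every walker
def pvIterA (n : Int) (st : List Int × List Int × List (List Int))
    (iteration : List (Int × Int × Bool)) : List Int × List Int × List (List Int) :=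
  let rw := iteration.foldl pvSwapA (st.1, st.2.1)
  (rw.1, rw.2,
   (PySem.List.pyRange 0 n 1).map (fun walker =>
     PySem.List.pyGetD st.2.2 walker [] ++ [PySem.List.pyGetD rw.1 walker 0]))

def reconstruct_trajectories (all_iterations : List (List (Int × Int × Bool))) : List (List Int) :=
  if all_iterations = [] then []
  else
    let n_replicas := pvMaxIndexSeen all_iterations + 1
    (all_iterations.foldl (pvIterA n_replicas)
      (PySem.List.pyRange 0 n_replicas 1, PySem.List.pyRange 0 n_replicas 1,
       (PySem.List.pyRange 0 n_replicas 1).map (fun _ => ([] : List Int)))).2.2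

-- ===== PORT B =====
-- body of B's inner loop: one swap record acting on walker_at_replica alone
def pvSwapB (wal : List Int) (t : Int × Int × Bool) : List Int :=
  if t.2.2 then
    PySem.List.pySetD (PySem.List.pySetD wal t.1 (PySem.List.pyGetD wal t.2.1 0)) t.2.1
      (PySem.List.pyGetD wal t.1 0)
  else wal

-- body of B's outer loop: apply the iteration's swaps, then snapshot walker_at_replica
def pvIterB (st : List Int × List (List Int))
    (iteration : List (Int × Int × Bool)) : List Int × List (List Int) :=
  let wal := iteration.foldl pvSwapB st.1
  (wal, st.2 ++ [wal])

-- B's snapshot inversion: inverse = [0]*n; for replica, walker in enumerate(snapshot): inverse[walker] = replica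
def pvInvert (n : Int) (snapshot : List Int) : List Int :=
  (PySem.List.enumerate snapshot 0).foldl
    (fun inverse rw => PySem.List.pySetD inverse rw.2 rw.1) (List.replicate n.toNat 0)

def reconstruct_trajectories_alt (all_iterations : List (List (Int × Int × Bool))) : List (List Int) :=
  if all_iterations = [] then []
  else
    let n_replicas := pvMaxIndexSeen all_iterations + 1
    let ws := all_iterations.foldl pvIterB (PySem.List.pyRange 0 n_replicas 1, [])
    let inverses := ws.2.map (fun snapshot => pvInvert n_replicas snapshot)
    (PySem.List.pyRange 0 n_replicas 1).map (fun walker =>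
      inverses.map (fun inverse => PySem.List.pyGetD inverse walker 0))

-- ===== PRECONDITION & SPEC =====
-- Pre_ restricts to the natural domain of swap records: it excludes nonempty inputs whose
-- iterations are all empty (Python's max() of an empty sequence raises ValueError) and inputs
-- where an accepted swap names a replica by a negative index — outside the natural domain of
-- replica indices — on which A raises IndexError (index < -n_replicas) or applies Python
-- negative-index wraparound.
def Pre_reconstruct_trajectories (all_iterations : List (List (Int × Int × Bool))) : Prop :=
  all_iterations = [] ∨
    ((∃ it ∈ all_iterations, it ≠ []) ∧
      ∀ it ∈ all_iterations, ∀ t ∈ it, t.2.2 = true → 0 ≤ t.1 ∧ 0 ≤ t.2.1)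
instance (all_iterations : List (List (Int × Int × Bool))) : Decidable (Pre_reconstruct_trajectories all_iterations) := by unfold Pre_reconstruct_trajectories; infer_instance

def pvWitness_reconstruct_trajectories : (List (List (Int × Int × Bool))) :=
  [[(0, 1, true)], [(1, 0, false), (0, 1, true)]]

def Spec_reconstruct_trajectories (all_iterations : List (List (Int × Int × Bool))) (out : List (List Int)) : Prop := out = reconstruct_trajectories_alt all_iterations
instance (all_iterations : List (List (Int × Int × Bool))) (out : List (List Int)) : Decidable (Spec_reconstruct_trajectories all_iterations out) := by unfold Spec_reconstruct_trajectories; infer_instance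

-- ===== CLAIM (what is proved, stated in full; the proofs are below) =====
def Claim_equal_reconstruct_trajectories : Prop := ∀ (all_iterations : List (List (Int × Int × Bool))), Dom_reconstruct_trajectories all_iterations → Pre_reconstruct_trajectories all_iterations → Spec_reconstruct_trajectories all_iterations (reconstruct_trajectories all_iterations)

-- ===== LEMMAS AND PROOFS =====

-- rep and wal are mutually inverse permutations of range n_replicas
def pvInv (n : Int) (rep wal : List Int) : Prop :=
  rep.length = n.toNat ∧ wal.length = n.toNat ∧
  (∀ i : Int, 0 ≤ i → i < n →
     0 ≤ PySem.List.pyGetD wal i 0 ∧ PySem.List.pyGetD wal i 0 < n ∧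
     PySem.List.pyGetD rep (PySem.List.pyGetD wal i 0) 0 = i) ∧
  (∀ w : Int, 0 ≤ w → w < n →
     0 ≤ PySem.List.pyGetD rep w 0 ∧ PySem.List.pyGetD rep w 0 < n ∧
     PySem.List.pyGetD wal (PySem.List.pyGetD rep w 0) 0 = w)

lemma pvGetSet (xs : List Int) (i m v : Int) (hi0 : 0 ≤ i)
    (hm0 : 0 ≤ m) (hm : m < (xs.length : Int)) :
    PySem.List.pyGetD (PySem.List.pySetD xs i v) m 0
      = if m = i then v else PySem.List.pyGetD xs m 0 := by
  rw [PySem.List.pySetD_of_nonneg xs v hi0]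
  rw [PySem.List.pyGetD_eq_getElem _ _ hm0 (by simpa using hm),
      PySem.List.pyGetD_eq_getElem _ _ hm0 hm]
  rw [List.getElem_set]
  by_cases hmi : m = i
  · simp [hmi]
  · rw [if_neg (by omega), if_neg hmi]

lemma pvGetRange (n i : Int) (h0 : 0 ≤ i) (h1 : i < n) :
    PySem.List.pyGetD (PySem.List.pyRange 0 n 1) i 0 = i := by
  rw [PySem.List.pyGetD_eq_getElem _ _ h0 (by simp [PySem.List.length_pyRange_one]; omega)]
  rw [PySem.List.getElem_pyRange_one]
  omega

lemma pvSwapA_snd (rep wal : List Int) (t : Int × Int × Bool) :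
    (pvSwapA (rep, wal) t).2 = pvSwapB wal t := by
  simp only [pvSwapA, pvSwapB]
  split <;> rfl

lemma pvInv_swap (n i j : Int) (rep wal : List Int) (h : pvInv n rep wal)
    (hi0 : 0 ≤ i) (hi1 : i < n) (hj0 : 0 ≤ j) (hj1 : j < n) :
    pvInv n (pvSwapA (rep, wal) (i, j, true)).1 (pvSwapA (rep, wal) (i, j, true)).2 := by
  obtain ⟨hr, hw, hA, hB⟩ := h
  have hn : 0 < n := by omega
  obtain ⟨hwi0, hwi1, hrwi⟩ := hA i hi0 hi1
  obtain ⟨hwj0, hwj1, hrwj⟩ := hA j hj0 hj1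
  set wi := PySem.List.pyGetD wal i 0 with hwi
  set wj := PySem.List.pyGetD wal j 0 with hwj
  have hwlen : ∀ m : Int, m < n → m < (wal.length : Int) := by intro m hm; omega
  have hrlen : ∀ m : Int, m < n → m < (rep.length : Int) := by intro m hm; omega
  have hXlen : (PySem.List.pySetD wal i wj).length = wal.length := by
    rw [PySem.List.pySetD_of_nonneg _ _ hi0]; simp
  have hYlen : (PySem.List.pySetD rep wi j).length = rep.length := by
    rw [PySem.List.pySetD_of_nonneg _ _ hwi0]; simp
  have gw : ∀ m : Int, 0 ≤ m → m < n →
      PySem.List.pyGetD (PySem.List.pySetD (PySem.List.pySetD wal i wj) j wi) m 0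
        = if m = j then wi else if m = i then wj else PySem.List.pyGetD wal m 0 := by
    intro m hm0 hm1
    rw [pvGetSet _ j m wi hj0 hm0 (by rw [hXlen]; exact hwlen m hm1)]
    by_cases hmj : m = j
    · simp [hmj]
    · rw [if_neg hmj, if_neg hmj, pvGetSet _ i m wj hi0 hm0 (hwlen m hm1)]
  have gr : ∀ m : Int, 0 ≤ m → m < n →
      PySem.List.pyGetD (PySem.List.pySetD (PySem.List.pySetD rep wi j) wj i) m 0
        = if m = wj then i else if m = wi then j else PySem.List.pyGetD rep m 0 := by
    intro m hm0 hm1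
    rw [pvGetSet _ wj m i hwj0 hm0 (by rw [hYlen]; exact hrlen m hm1)]
    by_cases hmj : m = wj
    · simp [hmj]
    · rw [if_neg hmj, if_neg hmj, pvGetSet _ wi m j hwi0 hm0 (hrlen m hm1)]
  have hinj : ∀ a b : Int, 0 ≤ a → a < n → 0 ≤ b → b < n →
      PySem.List.pyGetD wal a 0 = PySem.List.pyGetD wal b 0 → a = b := by
    intro a b ha0 ha1 hb0 hb1 hab
    have h1 := (hA a ha0 ha1).2.2
    have h2 := (hA b hb0 hb1).2.2
    rw [hab] at h1; rw [h1] at h2; exact h2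
  have hwieq : wi = wj → i = j := fun hh => hinj i j hi0 hi1 hj0 hj1 hh
  simp only [pvSwapA]
  rw [if_pos trivial, ← hwi, ← hwj]
  refine ⟨by rw [PySem.List.pySetD_of_nonneg _ _ hwj0]; simp [hYlen, hr],
          by rw [PySem.List.pySetD_of_nonneg _ _ hj0]; simp [hXlen, hw], ?_, ?_⟩
  · intro k hk0 hk1
    rw [gw k hk0 hk1]
    by_cases h1 : k = j
    · rw [if_pos h1]
      refine ⟨hwi0, hwi1, ?_⟩
      rw [gr wi hwi0 hwi1]
      by_cases h2 : wi = wj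
      · rw [if_pos h2, hwieq h2, h1]
      · rw [if_neg h2, if_pos rfl, h1]
    · rw [if_neg h1]
      by_cases h2 : k = i
      · rw [if_pos h2]
        refine ⟨hwj0, hwj1, ?_⟩
        rw [gr wj hwj0 hwj1, if_pos rfl, h2]
      · rw [if_neg h2]
        obtain ⟨ha, hb, hc⟩ := hA k hk0 hk1
        refine ⟨ha, hb, ?_⟩
        rw [gr _ ha hb]
        rw [if_neg (fun hh => h1 (hinj k j hk0 hk1 hj0 hj1 hh)),
            if_neg (fun hh => h2 (hinj k i hk0 hk1 hi0 hi1 hh))]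
        exact hc
  · intro w hw0 hw1
    rw [gr w hw0 hw1]
    by_cases h1 : w = wj
    · rw [if_pos h1]
      refine ⟨hi0, hi1, ?_⟩
      rw [gw i hi0 hi1]
      by_cases h2 : i = j
      · rw [if_pos h2, h1, hwi, hwj, h2]
      · rw [if_neg h2, if_pos rfl, h1]
    · rw [if_neg h1]
      by_cases h2 : w = wi
      · rw [if_pos h2]
        refine ⟨hj0, hj1, ?_⟩
        rw [gw j hj0 hj1, if_pos rfl, h2]
      · rw [if_neg h2]
        obtain ⟨ha, hb, hc⟩ := hB w hw0 hw1
        refine ⟨ha, hb, ?_⟩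
        rw [gw _ ha hb]
        rw [if_neg (fun hh => h1 (by rw [← hc, hh])),
            if_neg (fun hh => h2 (by rw [← hc, hh]))]
        exact hc

lemma pvInv_fold (n : Int) (it : List (Int × Int × Bool))
    (hit : ∀ t ∈ it, t.2.2 = true → 0 ≤ t.1 ∧ t.1 < n ∧ 0 ≤ t.2.1 ∧ t.2.1 < n)
    (rep wal : List Int) (h : pvInv n rep wal) :
    pvInv n (it.foldl pvSwapA (rep, wal)).1 (it.foldl pvSwapA (rep, wal)).2 ∧
      (it.foldl pvSwapA (rep, wal)).2 = it.foldl pvSwapB wal := by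
  induction it generalizing rep wal with
  | nil => exact ⟨h, rfl⟩
  | cons t ts ih =>
    have hstep : pvInv n (pvSwapA (rep, wal) t).1 (pvSwapA (rep, wal) t).2 := by
      by_cases hacc : t.2.2 = true
      · obtain ⟨h1, h2, h3, h4⟩ := hit t (by simp) hacc
        have ht : t = (t.1, t.2.1, true) := by
          rw [← hacc]
        rw [ht]
        exact pvInv_swap n t.1 t.2.1 rep wal h h1 h2 h3 h4
      · simp only [pvSwapA, if_neg hacc]
        exact h
    have hsnd := pvSwapA_snd rep wal t
    have := ih (fun t ht => hit t (by simp [ht])) (pvSwapA (rep, wal) t).1 (pvSwapA (rep, wal) t).2 hstep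
    simp only [List.foldl_cons]
    rw [← hsnd]
    exact this

lemma pvIndexEq (n : Int) (rep wal : List Int) (h : pvInv n rep wal)
    (w : Int) (hw0 : 0 ≤ w) (hw1 : w < n) :
    (((PySem.List.index? wal w).getD 0 : Nat) : Int) = PySem.List.pyGetD rep w 0 := by
  obtain ⟨hr, hw', hA, hB⟩ := h
  obtain ⟨hp0, hp1, hwp⟩ := hB w hw0 hw1
  set p := PySem.List.pyGetD rep w 0 with hp
  have hplt : p.toNat < wal.length := by omega
  have hwelem : wal[p.toNat] = w := by
    rw [← hwp, PySem.List.pyGetD_eq_getElem _ _ hp0 (by omega)]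
  have hidx : PySem.List.index? wal w = some p.toNat := by
    rw [PySem.List.index?_eq_some_iff]
    refine ⟨wal.take p.toNat, wal.drop (p.toNat + 1), ?_, ?_, ?_⟩
    · rw [← hwelem]
      conv_lhs => rw [← List.take_append_drop p.toNat wal]
      rw [← List.getElem_cons_drop hplt]
    · simp [List.length_take]; omega
    · intro hmem
      rw [List.mem_iff_getElem] at hmem
      obtain ⟨k, hk, hke⟩ := hmem
      have hklen : k < wal.length := by simp [List.length_take] at hk; omega
      have hkp : k < p.toNat := by simp [List.length_take] at hk; omega
      rw [List.getElem_take] at hke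
      have hwk : PySem.List.pyGetD wal (k : Int) 0 = w := by
        rw [PySem.List.pyGetD_eq_getElem _ _ (by omega) (by simpa using hklen)]
        simpa using hke
      have := (hA (k : Int) (by omega) (by omega)).2.2
      rw [hwk, ← hp] at this
      omega
  rw [hidx]
  simp
  omega

lemma pvScatter (wal : List Int) (s : Int) (inv0 : List Int) (w : Int)
    (hvals : ∀ v ∈ wal, 0 ≤ v ∧ v < (inv0.length : Int))
    (hnodup : wal.Nodup) (hw0 : 0 ≤ w) (hw1 : w < (inv0.length : Int)) :
    PySem.List.pyGetD
      ((PySem.List.enumerate wal s).foldl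
        (fun inverse rw => PySem.List.pySetD inverse rw.2 rw.1) inv0) w 0
      = if w ∈ wal then s + (((PySem.List.index? wal w).getD 0 : Nat) : Int)
        else PySem.List.pyGetD inv0 w 0 := by
  induction wal generalizing s inv0 with
  | nil => simp [PySem.List.enumerate]
  | cons x xs ih =>
    rw [PySem.List.enumerate_cons, List.foldl_cons]
    have hx := hvals x (by simp)
    have hlen : (PySem.List.pySetD inv0 x s).length = inv0.length := by
      rw [PySem.List.pySetD_of_nonneg _ _ hx.1]; simp
    have hxs : ∀ v ∈ xs, 0 ≤ v ∧ v < ((PySem.List.pySetD inv0 x s).length : Int) := by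
      intro v hv; rw [hlen]; exact hvals v (by simp [hv])
    rw [ih (s + 1) (PySem.List.pySetD inv0 x s) hxs hnodup.of_cons (by omega)]
    by_cases hwx : w = x
    · have hwmem : w ∉ xs := by rw [hwx]; exact (List.nodup_cons.mp hnodup).1
      rw [if_neg hwmem, if_pos (by simp [hwx]), hwx, PySem.List.index?_cons_self]
      rw [pvGetSet inv0 x x s hx.1 hx.1 hx.2]
      simp
    · by_cases hwmem : w ∈ xs
      · rw [if_pos hwmem, if_pos (by simp [hwmem])]
        rw [PySem.List.index?_cons_of_ne xs (fun hh => hwx hh.symm)]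
        obtain ⟨k, hk⟩ := Option.isSome_iff_exists.mp
          ((PySem.List.index?_isSome_iff xs w).mpr hwmem)
        rw [hk]
        simp
        omega
      · rw [if_neg hwmem, if_neg (by simp [hwx, hwmem])]
        rw [pvGetSet inv0 x w s hx.1 hw0 hw1, if_neg hwx]

lemma pvNodup (n : Int) (rep wal : List Int) (h : pvInv n rep wal) : wal.Nodup := by
  obtain ⟨hr, hw, hA, hB⟩ := h
  rw [List.nodup_iff_injective_getElem]
  intro a b hab
  replace hab : wal[(a : Nat)] = wal[(b : Nat)] := hab
  have ha : ((a : Nat) : Int) < n := by have := a.2; omega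
  have hb : ((b : Nat) : Int) < n := by have := b.2; omega
  have hga : PySem.List.pyGetD wal ((a : Nat) : Int) 0 = wal[(a : Nat)] := by
    rw [PySem.List.pyGetD_eq_getElem _ _ (by omega) (by exact_mod_cast a.2)]
    simp
  have hgb : PySem.List.pyGetD wal ((b : Nat) : Int) 0 = wal[(b : Nat)] := by
    rw [PySem.List.pyGetD_eq_getElem _ _ (by omega) (by exact_mod_cast b.2)]
    simp
  have h1 := (hA a (by omega) ha).2.2
  have h2 := (hA b (by omega) hb).2.2
  rw [hga, hab, ← hgb] at h1
  rw [h1] at h2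
  apply Fin.ext
  omega

lemma pvInvertEq (n : Int) (rep wal : List Int) (h : pvInv n rep wal)
    (w : Int) (hw0 : 0 ≤ w) (hw1 : w < n) :
    PySem.List.pyGetD (pvInvert n wal) w 0 = PySem.List.pyGetD rep w 0 := by
  obtain ⟨hr, hw', hA, hB⟩ := h
  have hlen : (List.replicate n.toNat (0 : Int)).length = n.toNat := by simp
  have hvals : ∀ v ∈ wal, 0 ≤ v ∧ v < ((List.replicate n.toNat (0 : Int)).length : Int) := by
    intro v hv
    rw [List.mem_iff_getElem] at hv
    obtain ⟨k, hk, hke⟩ := hv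
    have := hA (k : Int) (by omega) (by omega)
    rw [PySem.List.pyGetD_eq_getElem _ _ (by omega) (by simpa using hk)] at this
    simp only [Int.toNat_natCast] at this
    rw [hke] at this
    rw [hlen]
    exact ⟨this.1, by omega⟩
  have hwmem : w ∈ wal := by
    obtain ⟨hp0, hp1, hwp⟩ := hB w hw0 hw1
    rw [← hwp]
    exact PySem.List.pyGetD_mem wal 0 ⟨by omega, by omega⟩
  rw [pvInvert, pvScatter wal 0 _ w hvals (pvNodup n rep wal ⟨hr, hw', hA, hB⟩) hw0 (by rw [hlen]; omega)]
  rw [if_pos hwmem]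
  rw [pvIndexEq n rep wal ⟨hr, hw', hA, hB⟩ w hw0 hw1]
  omega

lemma pvOuter (n : Int) (its : List (List (Int × Int × Bool)))
    (hits : ∀ it ∈ its, ∀ t ∈ it, t.2.2 = true → 0 ≤ t.1 ∧ t.1 < n ∧ 0 ≤ t.2.1 ∧ t.2.1 < n)
    (rep wal : List Int) (snaps : List (List Int)) (h : pvInv n rep wal) :
    (its.foldl (pvIterA n)
        (rep, wal,
         (PySem.List.pyRange 0 n 1).map (fun w =>
           snaps.map (fun s => PySem.List.pyGetD (pvInvert n s) w 0)))).2.2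
      = (PySem.List.pyRange 0 n 1).map (fun w =>
          ((its.foldl pvIterB (wal, snaps)).2).map
            (fun s => PySem.List.pyGetD (pvInvert n s) w 0)) := by
  induction its generalizing rep wal snaps with
  | nil => rfl
  | cons it its ih =>
    obtain ⟨hinv', hsnd⟩ :=
      pvInv_fold n it (hits it (by simp)) rep wal h
    set rw := it.foldl pvSwapA (rep, wal) with hrw
    have htraj :
        (PySem.List.pyRange 0 n 1).map (fun walker =>
          PySem.List.pyGetD
            ((PySem.List.pyRange 0 n 1).map (fun w =>
              snaps.map (fun s => PySem.List.pyGetD (pvInvert n s) w 0))) walker []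
          ++ [PySem.List.pyGetD rw.1 walker 0])
        = (PySem.List.pyRange 0 n 1).map (fun w =>
            (snaps ++ [rw.2]).map (fun s => PySem.List.pyGetD (pvInvert n s) w 0)) := by
      apply List.map_congr_left
      intro w hwmem
      rw [PySem.List.mem_pyRange_one] at hwmem
      rw [PySem.List.pyGetD_map_pyRange_of_nonneg _ n w [] hwmem.1 hwmem.2]
      rw [List.map_append]
      rw [← pvInvertEq n rw.1 rw.2 hinv' w hwmem.1 hwmem.2]
      rfl
    simp only [List.foldl_cons]
    show ((its.foldl (pvIterA n) (pvIterA n (rep, wal, _) it))).2.2 = _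
    rw [show pvIterA n (rep, wal,
          (PySem.List.pyRange 0 n 1).map (fun w =>
            snaps.map (fun s => PySem.List.pyGetD (pvInvert n s) w 0))) it
        = (rw.1, rw.2,
           (PySem.List.pyRange 0 n 1).map (fun w =>
             (snaps ++ [rw.2]).map (fun s => PySem.List.pyGetD (pvInvert n s) w 0)))
      from by simp only [pvIterA]; rw [← htraj]]
    rw [show pvIterB (wal, snaps) it = (rw.2, snaps ++ [rw.2]) from by
      simp only [pvIterB]; rw [← hsnd]]
    exact ih (fun it' h' => hits it' (by simp [h'])) rw.1 rw.2 (snaps ++ [rw.2]) hinv'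

-- ===== VERDICT (by name: the statement is the Claim_ definition above) =====
theorem reconstruct_trajectories_spec : Claim_equal_reconstruct_trajectories := by
  unfold Claim_equal_reconstruct_trajectories
  intro all_iterations _ hpre
  unfold Spec_reconstruct_trajectories
  by_cases hnil : all_iterations = []
  · simp [reconstruct_trajectories, reconstruct_trajectories_alt, hnil]
  · rcases hpre with h | ⟨⟨it0, hit0, hne0⟩, hnn⟩
    · exact absurd h hnil
    set M := pvMaxIndexSeen all_iterations with hM
    have hmax : ∀ v ∈ all_iterations.flatMap
        (fun iteration => iteration.map (fun t => max t.1 t.2.1)), v ≤ M := by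
      intro v hv
      cases hm : PySem.List.max? (all_iterations.flatMap
          (fun iteration => iteration.map (fun t => max t.1 t.2.1))) id with
      | none =>
        rw [(PySem.List.max?_eq_none_iff _ _).mp hm] at hv
        simp at hv
      | some m =>
        have h1 := PySem.List.max?_isMax hm v hv
        have h2 : M = m := by rw [hM]; unfold pvMaxIndexSeen; rw [hm]; rfl
        simpa [h2] using h1
    have hits : ∀ it ∈ all_iterations, ∀ t ∈ it, t.2.2 = true →
        0 ≤ t.1 ∧ t.1 < M + 1 ∧ 0 ≤ t.2.1 ∧ t.2.1 < M + 1 := by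
      intro it hi t ht hacc
      obtain ⟨h1, h2⟩ := hnn it hi t ht hacc
      have h3 : max t.1 t.2.1 ≤ M := by
        refine hmax _ ?_
        rw [List.mem_flatMap]
        exact ⟨it, hi, List.mem_map.mpr ⟨t, ht, rfl⟩⟩
      have h4 := le_max_left t.1 t.2.1
      have h5 := le_max_right t.1 t.2.1
      exact ⟨h1, by omega, h2, by omega⟩
    have hinv : pvInv (M + 1) (PySem.List.pyRange 0 (M + 1) 1)
        (PySem.List.pyRange 0 (M + 1) 1) := by
      refine ⟨by simp [PySem.List.length_pyRange_one],
              by simp [PySem.List.length_pyRange_one], ?_, ?_⟩ <;>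
        · intro i h0 h1
          rw [pvGetRange _ _ h0 h1]
          exact ⟨h0, h1, pvGetRange _ _ h0 h1⟩
    have h0 := pvOuter (M + 1) all_iterations hits _ _ [] hinv
    simp only [List.map_nil] at h0
    simp only [reconstruct_trajectories, reconstruct_trajectories_alt, if_neg hnil,
      List.map_map, Function.comp_def]
    rw [← hM]
    exact h0
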